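-- pv_equiv track=rewrite | github.com/muru4a/python | Leetcode/average_score.py | averge_score
-- ===== SOURCE A (Python) =====
-- import collections,heapq
--
-- def averge_score(items):
--     result = []
--     d=collections.defaultdict(list)
--     for student,mark in items:
--         d[student].append(mark)
--     for student,marks in d.items():
--         avg= sum(heapq.nlargest(5,marks))//5
--         result.append([student,avg])
--     return result
-- ===== SOURCE B (Python) =====
-- def _push_top5(top, mark):
--     # 'top' is sorted descending with at most 5 entries; insert 'mark' in order
--     # (after equal marks), then keep only the largest 5.
--     out = []
--     i = 0
--     while i < len(top) and top[i] >= mark: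
--         out.append(top[i])
--         i += 1
--     out.append(mark)
--     while i < len(top):
--         out.append(top[i])
--         i += 1
--     return out[:5]
--
--
-- def averge_score(items):
--     tops = {}
--     for student, mark in items:
--         tops[student] = _push_top5(tops.get(student, []), mark)
--     return [[s, sum(top) // 5] for s, top in tops.items()]
-- ===== Notes on version B (the rewrite author's own statement) =====
-- stated objective: alternative
-- what changed: B fuses grouping and top-5 selection into one streaming pass that keeps, per student, only a bounded (size-5) descending list maintained by ordered insertion, instead of storing every mark and running nlargest over the full list per student afterwards.
import Mathlib
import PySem

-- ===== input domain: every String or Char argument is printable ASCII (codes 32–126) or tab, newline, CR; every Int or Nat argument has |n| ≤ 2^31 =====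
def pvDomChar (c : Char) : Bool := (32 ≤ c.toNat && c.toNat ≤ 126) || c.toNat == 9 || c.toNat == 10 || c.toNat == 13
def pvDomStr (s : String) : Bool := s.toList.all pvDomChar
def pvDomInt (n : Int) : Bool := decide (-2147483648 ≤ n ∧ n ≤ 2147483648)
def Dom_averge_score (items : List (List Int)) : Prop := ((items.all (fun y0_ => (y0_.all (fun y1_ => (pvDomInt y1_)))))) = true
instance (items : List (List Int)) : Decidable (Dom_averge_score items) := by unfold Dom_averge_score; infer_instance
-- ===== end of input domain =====

-- B keeps only a bounded per-student top-5 list in one streaming pass, instead of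
-- grouping all marks and calling nlargest per student afterwards (objective: alternative).

-- ===== PORT A =====
-- for student,mark in items: d[student].append(mark)   (items with len != 2 raise in Python; excluded by Pre_, skipped here)
def stepA (d : PySem.Dict Int (List Int)) (l : List Int) : PySem.Dict Int (List Int) :=
  match l with
  | [student, mark] => d.modify student [] (fun marks => marks ++ [mark])
  | _ => d

def averge_score (items : List (List Int)) : List (List Int) :=
  -- then for student,marks in d.items(): avg = sum(heapq.nlargest(5, marks)) // 5; result.append([student, avg])
  -- heapq.nlargest(5, marks) is ported by its contract: sorted(marks, reverse=True)[:5]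
  (items.foldl stepA PySem.Dict.empty).items.foldl (fun result p =>
    result ++ [[p.1, PySem.Int.floordiv ((PySem.List.sorted p.2 (fun x => x) true).take 5).sum 5]]) []

-- ===== PORT B =====
-- _push_top5: ordered insertion into the descending top list, then [:5]
def insertTop (top : List Int) (mark : Int) : List Int :=
  match top with
  | [] => [mark]
  | h :: t => if h ≥ mark then h :: insertTop t mark else mark :: h :: t

def push5 (top : List Int) (mark : Int) : List Int := (insertTop top mark).take 5

-- one streaming pass: tops[student] = _push_top5(tops.get(student, []), mark)
def stepB (d : PySem.Dict Int (List Int)) (l : List Int) : PySem.Dict Int (List Int) :=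
  match l with
  | [student, mark] => d.modify student [] (fun top => push5 top mark)
  | _ => d

def averge_score_alt (items : List (List Int)) : List (List Int) :=
  (items.foldl stepB PySem.Dict.empty).items.map (fun p => [p.1, PySem.Int.floordiv p.2.sum 5])

-- ===== PRECONDITION & SPEC =====
-- Pre_ excludes exactly the inputs where Python A raises: an inner list that is not
-- a [student, mark] pair makes 'for student,mark in items' raise ValueError/TypeError.
def Pre_averge_score (items : List (List Int)) : Prop :=
  (items.all (fun l => l.length == 2)) = true
instance (items : List (List Int)) : Decidable (Pre_averge_score items) := by
  unfold Pre_averge_score; infer_instance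

def pvWitness_averge_score : List (List Int) :=
  [[1, 90], [2, 70], [1, 80], [1, 95], [1, 60], [1, 100], [1, 85], [2, 40]]

def Spec_averge_score (items : List (List Int)) (out : List (List Int)) : Prop :=
  out = averge_score_alt items
instance (items : List (List Int)) (out : List (List Int)) : Decidable (Spec_averge_score items out) := by
  unfold Spec_averge_score; infer_instance

-- ===== CLAIM (what is proved, stated in full; the proofs are below) =====
def Claim_equal_averge_score : Prop :=
  ∀ (items : List (List Int)), Dom_averge_score items → Pre_averge_score items →
    Spec_averge_score items (averge_score items)

-- ===== LEMMAS AND PROOFS =====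

-- top-5 of the marks seen so far, descending
def top5 (v : List Int) : List Int := (PySem.List.sorted v (fun x => x) true).take 5

theorem insertTop_eq_insertBy (t : List Int) (m : Int) :
    insertTop t m = PySem.List.insertBy (fun a b => decide (b < a)) m t := by
  induction t with
  | nil => rfl
  | cons h tl ih =>
    simp only [insertTop, PySem.List.insertBy]
    by_cases hm : h ≥ m
    · rw [if_pos hm, if_neg (by simpa using hm), ih]
    · rw [if_neg hm, if_pos (by simpa using lt_of_not_ge hm)]

theorem sortedDesc_append (v : List Int) (m : Int) :
    PySem.List.sorted (v ++ [m]) (fun x => x) true =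
      insertTop (PySem.List.sorted v (fun x => x) true) m := by
  rw [PySem.List.sorted_rev_eq_foldl_insertBy (v ++ [m]) (fun x => x), List.foldl_append,
    ← PySem.List.sorted_rev_eq_foldl_insertBy v (fun x => x), List.foldl_cons, List.foldl_nil,
    insertTop_eq_insertBy]

theorem take_insertTop (t : List Int) : ∀ (n : Nat) (m : Int),
    (insertTop t m).take n = (insertTop (t.take n) m).take n := by
  induction t with
  | nil => intro n m; simp [insertTop]
  | cons h tl ih =>
    intro n m
    cases n with
    | zero => rfl
    | succ k =>
      simp only [List.take_succ_cons, insertTop]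
      by_cases hm : h ≥ m
      · rw [if_pos hm, if_pos hm]
        simp only [List.take_succ_cons, ih k m]
      · rw [if_neg hm, if_neg hm]
        simp only [List.take_succ_cons]
        cases k with
        | zero => rfl
        | succ j => simp [List.take_take]

theorem top5_append (v : List Int) (m : Int) : top5 (v ++ [m]) = push5 (top5 v) m := by
  unfold top5 push5
  rw [sortedDesc_append, take_insertTop _ 5 m]

theorem keys_modify_single (d : PySem.Dict Int (List Int)) (s : Int) (f : List Int → List Int) :
    (d.modify s [] f).keys = PySem.Set.update d.keys [s] := by
  have h := PySem.Dict.keys_foldl_modify_key (l := [s]) (key := fun x => x) (d0 := ([] : List Int))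
    (f := fun _ _ v => f v) d
  simpa using h

theorem nodup_keys_modify (d : PySem.Dict Int (List Int)) (s : Int) (f : List Int → List Int)
    (h : d.keys.Nodup) : (d.modify s [] f).keys.Nodup := by
  have h2 := PySem.Dict.nodup_keys_foldl_modify_key (l := [s]) (key := fun x => x)
    (d0 := ([] : List Int)) (f := fun _ _ v => f v) d h
  simpa using h2

theorem fold_invariant (items : List (List Int)) :
    ∀ (d1 d2 : PySem.Dict Int (List Int)),
      d1.keys = d2.keys → d1.keys.Nodup → (∀ s, d2.getD s [] = top5 (d1.getD s [])) →
      (items.foldl stepA d1).keys = (items.foldl stepB d2).keys ∧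
      (items.foldl stepA d1).keys.Nodup ∧
      (∀ s, (items.foldl stepB d2).getD s [] = top5 ((items.foldl stepA d1).getD s [])) := by
  induction items with
  | nil => intro d1 d2 hk hn hv; exact ⟨hk, hn, hv⟩
  | cons l rest ih =>
    intro d1 d2 hk hn hv
    simp only [List.foldl_cons]
    unfold stepA stepB
    match l with
    | [] => exact ih d1 d2 hk hn hv
    | [_] => exact ih d1 d2 hk hn hv
    | (s :: m :: _ :: _) => exact ih d1 d2 hk hn hv
    | [s, m] =>
      apply ih
      · show (d1.modify s [] _).keys = (d2.modify s [] _).keys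
        rw [keys_modify_single, keys_modify_single, hk]
      · exact nodup_keys_modify d1 s _ hn
      · intro t
        show (d2.modify s [] _).getD t [] = top5 ((d1.modify s [] _).getD t [])
        rw [PySem.Dict.getD_modify, PySem.Dict.getD_modify]
        by_cases ht : t = s
        · rw [if_pos ht, if_pos ht, hv s, top5_append]
        · rw [if_neg ht, if_neg ht, hv t]

theorem foldl_append_eq_map (xs : List (Int × List Int)) (g : Int × List Int → List Int) :
    ∀ (acc : List (List Int)),
      xs.foldl (fun result p => result ++ [g p]) acc = acc ++ xs.map g := by
  induction xs with
  | nil => intro acc; simp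
  | cons x t ih => intro acc; simp [ih]

-- ===== VERDICT (by name: the statement is the Claim_ definition above) =====
theorem averge_score_spec : Claim_equal_averge_score := by
  intro items _ _
  show averge_score items = averge_score_alt items
  unfold averge_score averge_score_alt
  have hinv := fold_invariant items PySem.Dict.empty PySem.Dict.empty
    rfl (by simp [PySem.Dict.keys_empty])
    (fun s => by simp [PySem.Dict.getD_empty, top5, PySem.List.sorted_eq_nil_iff])
  obtain ⟨hk, hn, hv⟩ := hinv
  set e1 := items.foldl stepA PySem.Dict.empty with he1
  set e2 := items.foldl stepB PySem.Dict.empty with he2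
  have hn2 : e2.keys.Nodup := hk ▸ hn
  rw [foldl_append_eq_map, List.nil_append,
    PySem.Dict.items_eq_map_keys e1 hn [], PySem.Dict.items_eq_map_keys e2 hn2 [],
    ← hk, List.map_map, List.map_map]
  apply List.map_congr_left
  intro k _
  simp only [Function.comp_apply]
  rw [hv k]
  rfl
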